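-- pv_equiv track=rewrite | github.com/maksim-shmat/knowlege | python/abbrev_simple.py | find_abbreviations_length
-- ===== SOURCE A (Python) =====
-- def find_abbreviations_length(command_table_text):
--     """ find the minimal abbreviation length for each word.
--     A word that does not have minimum abbreviation length specified
--     gets it`s full length as the minimum.
--     """
--     command_table = dict()
--     input_iter = iter(command_table_text.split())
--
--     word = None
--     try:
--         while True:
--             if word is None:
--                 word = next(input_iter)
--             abbr_len = next(input_iter, len(word))
--             try:
--                 command_table[word] = int(abbr_len)
--                 word = None
--             except ValueError:
--                 command_table[word] = len(word)
--                 word = abbr_len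
--     except StopIteration:
--         pass
--     return command_table
-- ===== SOURCE B (Python) =====
-- def _as_int(s):
--     try:
--         return int(s)
--     except ValueError:
--         return None
--
-- def find_abbreviations_length(command_table_text):
--     """ find the minimal abbreviation length for each word. """
--     table = {}
--     tokens = command_table_text.split()
--     while tokens:
--         word = tokens[0]
--         rest = tokens[1:]
--         n = _as_int(rest[0]) if rest else None
--         if n is not None:
--             table[word] = n
--             tokens = rest[1:]
--         else:
--             table[word] = len(word)
--             tokens = rest
--     return table
-- ===== Notes on version B (the rewrite author's own statement) =====
-- stated objective: simpler
-- what changed: Replaced the None-sentinel carried-word state machine with exception-driven lookahead by a plain two-token consumption loop over the token list (take a word, peek at the next token, consume it as the length if it parses as int, else use len(word)).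
import Mathlib
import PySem

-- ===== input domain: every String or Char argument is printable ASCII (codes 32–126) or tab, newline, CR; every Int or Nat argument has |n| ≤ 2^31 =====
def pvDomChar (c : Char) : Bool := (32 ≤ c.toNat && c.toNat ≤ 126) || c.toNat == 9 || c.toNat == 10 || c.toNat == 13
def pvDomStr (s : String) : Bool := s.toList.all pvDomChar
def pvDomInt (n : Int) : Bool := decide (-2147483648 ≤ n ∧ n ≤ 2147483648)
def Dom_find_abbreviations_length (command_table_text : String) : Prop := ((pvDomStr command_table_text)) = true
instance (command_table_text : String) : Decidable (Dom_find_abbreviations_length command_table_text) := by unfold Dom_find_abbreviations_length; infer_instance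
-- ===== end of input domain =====

-- B replaces A's None-sentinel carried-word state machine (exception-driven lookahead via iterator) by a
-- plain two-token consumption loop over the token list; objective: simpler, same O(n) cost.


-- ===== PORT A =====
-- A's while-True loop over the iterator, with the carried `word : Option String` state;
-- `next(input_iter, len(word))` with an exhausted iterator is the `some w, []` case.
def pvALoop (word? : Option String) (rem : List String) (t : PySem.Dict String Int) :
    PySem.Dict String Int :=
  match word?, rem with
  | none, [] => t                                   -- `word = next(input_iter)` raises StopIteration
  | none, w :: rs => pvALoop (some w) rs t          -- `word = next(input_iter)`
  | some w, [] => t.insert w (PySem.Str.len w)      -- default len(word); int() succeeds; next round raises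
  | some w, a :: rs =>
    match PySem.Int.ofStr? a with
    | some n => pvALoop none rs (t.insert w n)      -- int(abbr_len) succeeded, word = None
    | none => pvALoop (some a) rs (t.insert w (PySem.Str.len w))  -- ValueError: word = abbr_len
termination_by 2 * rem.length + (if word?.isSome then 1 else 0)

def find_abbreviations_length (command_table_text : String) : List (String × Int) :=
  (pvALoop none (PySem.Str.split₀ command_table_text) PySem.Dict.empty).items

-- ===== PORT B =====
-- _as_int in Source B
def pvAsInt (s : String) : Option Int := PySem.Int.ofStr? s

-- Source B's while-loop over the remaining token list
def pvBLoop (tokens : List String) (t : PySem.Dict String Int) : PySem.Dict String Int :=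
  match tokens with
  | [] => t
  | [w] => pvBLoop [] (t.insert w (PySem.Str.len w))          -- rest = [] : len(word), tokens := rest
  | w :: a :: rest' =>
    match pvAsInt a with
    | some n => pvBLoop rest' (t.insert w n)                  -- consumed two tokens
    | none => pvBLoop (a :: rest') (t.insert w (PySem.Str.len w))
termination_by tokens.length

def find_abbreviations_length_alt (command_table_text : String) : List (String × Int) :=
  (pvBLoop (PySem.Str.split₀ command_table_text) PySem.Dict.empty).items

-- ===== PRECONDITION & SPEC =====
def Spec_find_abbreviations_length (command_table_text : String) (out : List (String × Int)) : Prop := out = find_abbreviations_length_alt command_table_text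
instance (command_table_text : String) (out : List (String × Int)) : Decidable (Spec_find_abbreviations_length command_table_text out) := by unfold Spec_find_abbreviations_length; infer_instance

-- ===== CLAIM (what is proved, stated in full; the proofs are below) =====
def Claim_equal_find_abbreviations_length : Prop := ∀ (command_table_text : String), Dom_find_abbreviations_length command_table_text → Spec_find_abbreviations_length command_table_text (find_abbreviations_length command_table_text)

-- ===== LEMMAS AND PROOFS =====
-- A's state machine and B's list walk compute the same table: `none` state = B at the full
-- remaining list, `some w` state = B at `w :: rem`.
theorem pvLoop_agree (rem : List String) :
    (∀ t, pvALoop none rem t = pvBLoop rem t) ∧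
    (∀ w t, pvALoop (some w) rem t = pvBLoop (w :: rem) t) := by
  induction rem with
  | nil =>
    exact ⟨fun t => by simp [pvALoop, pvBLoop], fun w t => by simp [pvALoop, pvBLoop]⟩
  | cons a rs ih =>
    refine ⟨fun t => ?_, fun w t => ?_⟩
    · simp only [pvALoop]
      exact ih.2 a t
    · simp only [pvALoop, pvBLoop, pvAsInt]
      cases h : PySem.Int.ofStr? a with
      | some n => simp [ih.1]
      | none => simp [ih.2]

-- ===== VERDICT (by name: the statement is the Claim_ definition above) =====
theorem find_abbreviations_length_spec : Claim_equal_find_abbreviations_length := by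
  intro s _
  unfold Spec_find_abbreviations_length find_abbreviations_length find_abbreviations_length_alt
  exact congrArg PySem.Dict.items ((pvLoop_agree _).1 _)
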